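-- pv_equiv track=rewrite | github.com/mayur75584/GeeksForGeeks | GeeksforGeeks/349(Print leaf nodes from preorder traversal of BST).py | leafNodes
-- ===== SOURCE A (Python) =====
-- def leafNodes(a,n):
--     ans=[]
--     stack=[]
--     stack.append(a[0])
--     for i in range(1,n):
--         if(a[i]<stack[-1]):
--             stack.append(a[i])
--         else:
--             #a[i]>stacl[-1] #stack top
--             tmp=stack[-1]
--             stack.pop(-1)
--             if(len(stack)!=0 and a[i]>stack[-1]):
--                 while(len(stack)!=0 and a[i]>stack[-1]):
--                     stack.pop(-1)
--                 ans.append(tmp)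
--             stack.append(a[i])
--     ans.append(a[n-1])
--     return ans
-- ===== SOURCE B (Python) =====
-- # Stateless reformulation: instead of maintaining a stack across steps, each step
-- # rescans the prefix backwards with a running maximum -- an earlier element is
-- # still pending iff it beats everything after it -- and reports a leaf when the
-- # new element settles at least two pending elements (the nearest one is the leaf).
-- def leafNodes(a, n):
--     ans = []
--     for i in range(1, n):
--         settled = []
--         best = None
--         for j in range(i - 1, -1, -1):
--             if best is None or a[j] > best:  # a[j] beats everything after it
--                 if a[j] < a[i]:
--                     settled.append(a[j])
--                 best = a[j]
--         if len(settled) >= 2: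
--             ans.append(settled[0])
--     ans.append(a[n - 1])
--     return ans
-- ===== Notes on version B (the rewrite author's own statement) =====
-- stated objective: alternative
-- what changed: Drops the mutable monotonic stack carried across iterations: each step independently rescans the prefix backwards with a running maximum (an element is pending iff it beats everything after it) and reports a leaf when the new element settles at least two pending values; Pre_ excludes prefixes a[:n] with duplicate values, where A's asymmetric pop rules (>= for the top, strict > below) give accidental tie behaviour (BST keys are distinct).
-- outside the precondition, e.g. on leafNodes([9, 2, 4, 3, 4, 5], 6): A returns [4, 5], B returns [5]
import Mathlib
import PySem

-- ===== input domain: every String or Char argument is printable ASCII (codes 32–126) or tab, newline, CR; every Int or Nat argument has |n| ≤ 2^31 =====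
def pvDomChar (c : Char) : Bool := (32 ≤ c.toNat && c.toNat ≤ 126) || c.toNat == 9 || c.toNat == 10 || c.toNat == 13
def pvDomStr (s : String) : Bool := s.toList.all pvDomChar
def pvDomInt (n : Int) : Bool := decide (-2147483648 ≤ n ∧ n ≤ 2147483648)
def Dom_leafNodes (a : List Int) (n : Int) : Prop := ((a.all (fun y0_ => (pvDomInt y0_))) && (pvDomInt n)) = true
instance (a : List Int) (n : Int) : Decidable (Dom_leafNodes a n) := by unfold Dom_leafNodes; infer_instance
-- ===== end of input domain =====

-- B replaces A's mutable cross-iteration stack by an independent backward scan with a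
-- running maximum at each step; same return value on duplicate-free prefixes (see Pre_).

-- ===== PORT A =====
-- The Python stack grows at the end; here the HEAD of the list is the stack top
-- (append = cons, stack[-1] = head, pop(-1) = tail).
-- 'while(len(stack)!=0 and a[i]>stack[-1]): stack.pop(-1)'
def popWhileA (x : Int) : List Int → List Int
  | [] => []
  | t :: rest => if x > t then popWhileA x rest else t :: rest

-- body of 'for i in range(1,n)'; state = (ans, stack)
def stepA (a : List Int) (st : List Int × List Int) (i : Int) : List Int × List Int :=
  let ans := st.1
  let stack := st.2
  let x := PySem.List.pyGetD a i 0
  match stack with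
  | [] => (ans, [x])          -- never reached: the stack always holds a[0] onward
  | t :: rest =>
    if x < t then (ans, x :: t :: rest)
    else
      let tmp := t
      match rest with
      | [] => (ans, x :: rest)
      | t2 :: _ => if x > t2 then (ans ++ [tmp], x :: popWhileA x rest) else (ans, x :: rest)

def leafNodes (a : List Int) (n : Int) : List Int :=
  let st := (PySem.List.pyRange 1 n 1).foldl (stepA a) ([], [PySem.List.pyGetD a 0 0])
  st.1 ++ [PySem.List.pyGetD a (n - 1) 0]

-- ===== PORT B =====
-- body of 'for j in range(i-1, -1, -1)'; state = (best, settled)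
def stepScan (a : List Int) (x : Int) (st : Option Int × List Int) (j : Int) :
    Option Int × List Int :=
  let v := PySem.List.pyGetD a j 0
  match st.1 with
  | none => (some v, if v < x then st.2 ++ [v] else st.2)
  | some b =>
    if b < v then (some v, if v < x then st.2 ++ [v] else st.2) else st

-- body of 'for i in range(1,n)'; state = ans
def stepB (a : List Int) (ans : List Int) (i : Int) : List Int :=
  let x := PySem.List.pyGetD a i 0
  let st := (PySem.List.pyRange (i - 1) (-1) (-1)).foldl (stepScan a x) (none, [])
  if 2 ≤ st.2.length then ans ++ [PySem.List.pyGetD st.2 0 0] else ans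

def leafNodes_alt (a : List Int) (n : Int) : List Int :=
  ((PySem.List.pyRange 1 n 1).foldl (stepB a) []) ++ [PySem.List.pyGetD a (n - 1) 0]

-- ===== PRECONDITION & SPEC =====
-- a ≠ [] for a[0]; n ≤ len(a) for the loop; 1 - len(a) ≤ n for a[n-1] (negative indexing).
-- Pre_ also excludes prefixes a[:n] with duplicate values: BST keys are distinct, and on
-- duplicates A's asymmetric pop rules (>= for the top, strict > below) give accidental
-- tie behaviour that B does not reproduce.
def Pre_leafNodes (a : List Int) (n : Int) : Prop :=
  a ≠ [] ∧ 1 - (a.length : Int) ≤ n ∧ n ≤ (a.length : Int) ∧ (a.take n.toNat).Nodup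
instance (a : List Int) (n : Int) : Decidable (Pre_leafNodes a n) := by
  unfold Pre_leafNodes; infer_instance

def pvWitness_leafNodes : List Int × Int := ([10, 5, 3, 4, 8, 12], 6)

def Spec_leafNodes (a : List Int) (n : Int) (out : List Int) : Prop := out = leafNodes_alt a n
instance (a : List Int) (n : Int) (out : List Int) : Decidable (Spec_leafNodes a n out) := by
  unfold Spec_leafNodes; infer_instance

-- ===== CLAIM (what is proved, stated in full; the proofs are below) =====
def Claim_equal_leafNodes : Prop :=
  ∀ (a : List Int) (n : Int), Dom_leafNodes a n → Pre_leafNodes a n →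
    Spec_leafNodes a n (leafNodes a n)

-- ===== LEMMAS AND PROOFS =====

-- A's stack (top = head) after reading a prefix, as a function of the REVERSED prefix:
-- the elements that beat everything after them = the running maxima of the reversed prefix.
def chain : List Int → List Int
  | [] => []
  | v :: r => v :: (chain r).filter (fun w => decide (v < w))

theorem chain_pairwise : ∀ r : List Int, (chain r).Pairwise (· < ·) := by
  intro r
  induction r with
  | nil => simp [chain]
  | cons v r ih =>
    refine List.pairwise_cons.mpr ⟨?_, ih.filter _⟩
    intro w hw
    simpa using (List.of_mem_filter hw)

theorem chain_subset : ∀ r : List Int, ∀ v ∈ chain r, v ∈ r := by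
  intro r
  induction r with
  | nil => simp [chain]
  | cons u r ih =>
    intro v hv
    rcases List.mem_cons.mp hv with h | h
    · simp [h]
    · exact List.mem_cons_of_mem u (ih v (List.mem_of_mem_filter h))

-- two lower-bound filters: the larger bound wins
theorem filter_absorb_lo (u v : Int) (h : u ≤ v) (l : List Int) :
    (l.filter (fun w => decide (v < w))).filter (fun w => decide (u < w))
      = l.filter (fun w => decide (v < w)) := by
  induction l with
  | nil => rfl
  | cons w l ih =>
    by_cases h1 : v < w
    · have h2 : u < w := by omega
      simp [List.filter_cons, h1, h2, ih]
    · simp [List.filter_cons, h1, ih]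

theorem filter_absorb_hi (u v : Int) (h : u ≤ v) (l : List Int) :
    (l.filter (fun w => decide (u < w))).filter (fun w => decide (v < w))
      = l.filter (fun w => decide (v < w)) := by
  induction l with
  | nil => rfl
  | cons w l ih =>
    by_cases h2 : v < w
    · have h1 : u < w := by omega
      simp [List.filter_cons, h1, h2, ih]
    · by_cases h1 : u < w <;> simp [List.filter_cons, h1, h2, ih]

-- the scan's step as a function of the VALUE a[j] (stepScan is exactly this; rfl)
def valStep (x : Int) (st : Option Int × List Int) (v : Int) : Option Int × List Int :=
  match st.1 with
  | none => (some v, if v < x then st.2 ++ [v] else st.2)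
  | some b =>
    if b < v then (some v, if v < x then st.2 ++ [v] else st.2) else st

theorem scan_go (x : Int) : ∀ (r : List Int) (b : Int) (acc : List Int),
    ∃ b', r.foldl (valStep x) (some b, acc) =
      (some b', acc ++ ((chain r).filter (fun w => decide (b < w))).filter
        (fun w => decide (w < x))) := by
  intro r
  induction r with
  | nil => intro b acc; exact ⟨b, by simp [chain]⟩
  | cons v r ih =>
    intro b acc
    have hch : chain (v :: r) = v :: (chain r).filter (fun w => decide (v < w)) := rfl
    by_cases hbv : b < v
    · obtain ⟨b', hb'⟩ := ih v (if v < x then acc ++ [v] else acc)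
      refine ⟨b', ?_⟩
      have hstep : valStep x (some b, acc) v = (some v, if v < x then acc ++ [v] else acc) := by
        simp [valStep, hbv]
      rw [List.foldl_cons, hstep, hb', hch]
      have e1 : (v :: (chain r).filter (fun w => decide (v < w))).filter
          (fun w => decide (b < w)) = v :: (chain r).filter (fun w => decide (v < w)) := by
        rw [List.filter_cons, if_pos (by simpa using hbv),
          filter_absorb_lo b v (le_of_lt hbv)]
      rw [e1, List.filter_cons]
      by_cases hvx : v < x <;> simp [hvx]
    · obtain ⟨b', hb'⟩ := ih b acc
      refine ⟨b', ?_⟩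
      have hstep : valStep x (some b, acc) v = (some b, acc) := by
        simp [valStep, hbv]
      rw [List.foldl_cons, hstep, hb', hch]
      have e1 : (v :: (chain r).filter (fun w => decide (v < w))).filter
          (fun w => decide (b < w))
          = (chain r).filter (fun w => decide (b < w)) := by
        rw [List.filter_cons, if_neg (by simpa using hbv),
          filter_absorb_hi v b (by omega)]
      rw [e1]

theorem scan_top (x : Int) (r : List Int) :
    ∃ o, r.foldl (valStep x) (none, []) =
      (o, (chain r).filter (fun w => decide (w < x))) := by
  cases r with
  | nil => exact ⟨none, by simp [chain]⟩
  | cons v r =>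
    obtain ⟨b', hb'⟩ := scan_go x r v (if v < x then [v] else [])
    refine ⟨some b', ?_⟩
    have hstep : valStep x (none, ([] : List Int)) v = (some v, if v < x then [v] else []) := by
      simp [valStep]
    rw [List.foldl_cons, hstep, hb']
    have hch : chain (v :: r) = v :: (chain r).filter (fun w => decide (v < w)) := rfl
    rw [hch, List.filter_cons]
    by_cases hvx : v < x <;> simp [hvx]

-- the countdown range of B's inner loop, mapped through a[·], is the reversed prefix
theorem map_countdown (a : List Int) : ∀ m : Nat, m ≤ a.length →
    (PySem.List.pyRange ((m : Int) - 1) (-1) (-1)).map (fun j => PySem.List.pyGetD a j 0)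
      = (a.take m).reverse := by
  intro m
  induction m with
  | zero =>
    intro _
    rw [PySem.List.pyRange_neg_one_eq_nil (by norm_num)]
    simp
  | succ m ih =>
    intro h
    have hm : m < a.length := by omega
    have hc : ((m + 1 : Nat) : Int) - 1 = (m : Int) := by push_cast; ring
    rw [hc, PySem.List.pyRange_neg_one_cons (by omega), List.map_cons]
    have hx : PySem.List.pyGetD a ((m : Nat) : Int) 0 = a[m] := by
      simp [PySem.List.pyGetD_natCast, List.getD_eq_getElem?_getD, List.getElem?_eq_getElem hm]
    have htk : a.take (m + 1) = a.take m ++ [a[m]] := by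
      rw [List.take_succ, List.getElem?_eq_getElem hm]
      rfl
    rw [hx, htk, List.reverse_append]
    simp [ih (by omega)]

-- B's step, fully characterised by the chain of the reversed prefix
theorem stepB_eq (a : List Int) (m : Nat) (hm : m ≤ a.length) (ans : List Int) :
    stepB a ans (m : Int) =
      (let x := PySem.List.pyGetD a (m : Int) 0
       let s := (chain ((a.take m).reverse)).filter (fun w => decide (w < x))
       if 2 ≤ s.length then ans ++ [PySem.List.pyGetD s 0 0] else ans) := by
  set x := PySem.List.pyGetD a (m : Int) 0 with hxdef
  have hfold : (PySem.List.pyRange ((m : Int) - 1) (-1) (-1)).foldl (stepScan a x) (none, [])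
      = ((a.take m).reverse).foldl (valStep x) (none, []) := by
    rw [← map_countdown a m hm, List.foldl_map]
    rfl
  obtain ⟨o, ho⟩ := scan_top x ((a.take m).reverse)
  simp only [stepB, ← hxdef, hfold, ho]

-- the simulation invariant after the loops have processed i = 1 .. m-1
def SimInv (a : List Int) (m : Nat) (sA : List Int × List Int) (ansB : List Int) : Prop :=
  sA.1 = ansB ∧ sA.2 = chain ((a.take m).reverse)

theorem filter_gt_self (x : Int) (l : List Int) (h : ∀ w ∈ l, x < w) :
    l.filter (fun w => decide (x < w)) = l := by
  apply List.filter_eq_self.mpr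
  intro w hw
  simpa using h w hw

theorem filter_lt_nil (x : Int) (l : List Int) (h : ∀ w ∈ l, x < w) :
    l.filter (fun w => decide (w < x)) = [] := by
  apply List.filter_eq_nil_iff.mpr
  intro w hw
  have := h w hw
  simp; omega

theorem popWhileA_eq_filter (x : Int) : ∀ s : List Int, s.Pairwise (· < ·) →
    (∀ v ∈ s, v ≠ x) → popWhileA x s = s.filter (fun w => decide (x < w)) := by
  intro s
  induction s with
  | nil => intro _ _; rfl
  | cons h t ih =>
    intro hp hne
    rw [List.pairwise_cons] at hp
    by_cases hxh : x > h
    · have : ¬ (x < h) := by omega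
      simp only [popWhileA, hxh, if_true, List.filter_cons, this, decide_false, if_false]
      exact ih hp.2 (fun v hv => hne v (List.mem_cons_of_mem h hv))
    · have hhx : x < h := by
        have := hne h (List.mem_cons_self)
        omega
      simp only [popWhileA, hxh, if_false, List.filter_cons, hhx, decide_true, if_true]
      rw [filter_gt_self x t (fun w hw => lt_trans hhx (hp.1 w hw))]

-- under Nodup of a[:n], a[m] does not occur among a[:m]
theorem not_mem_take (a : List Int) (n m : Nat) (hnd : (a.take n).Nodup)
    (hmn : m < n) (hml : m < a.length) : a[m] ∉ a.take m := by
  intro hmem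
  have h1 : a.take m = (a.take n).take m := by
    rw [List.take_take]
    congr 1
    omega
  have hml' : m < (a.take n).length := by
    simp
    omega
  have h2 : a[m] = (a.take n)[m] := (List.getElem_take ..).symm
  have hdisj : List.Disjoint ((a.take n).take m) ((a.take n).drop m) :=
    List.disjoint_take_drop hnd (le_refl m)
  have h3 : (a.take n)[m] ∈ (a.take n).drop m := by
    rw [List.drop_eq_getElem_cons hml']
    exact List.mem_cons_self
  rw [h1, h2] at hmem
  exact (List.disjoint_left.mp hdisj hmem) h3

-- one synchronised iteration of both outer loops
theorem step_inv (a : List Int) (nn m : Nat) (hnd : (a.take nn).Nodup)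
    (hm1 : 1 ≤ m) (hmn : m < nn) (hnl : nn ≤ a.length)
    (sA : List Int × List Int) (ansB : List Int) (h : SimInv a m sA ansB) :
    SimInv a (m + 1) (stepA a sA (m : Int)) (stepB a ansB (m : Int)) := by
  obtain ⟨ansA, stackA⟩ := sA
  obtain ⟨hans, hstack⟩ := h
  simp only at hans hstack
  have hml : m < a.length := by omega
  set x := PySem.List.pyGetD a (m : Int) 0 with hxdef
  have hxval : x = a[m] := by
    simp [hxdef, PySem.List.pyGetD_natCast, List.getD_eq_getElem?_getD,
      List.getElem?_eq_getElem hml]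
  set R := chain ((a.take m).reverse) with hRdef
  have hpair : R.Pairwise (· < ·) := chain_pairwise _
  have hne : ∀ v ∈ R, v ≠ x := by
    intro v hv
    have h1 : v ∈ a.take m := by
      have := chain_subset _ v hv
      simpa using this
    intro hvx
    rw [hvx, hxval] at h1
    exact not_mem_take a nn m hnd hmn hml h1
  have htake : (a.take (m+1)).reverse = x :: (a.take m).reverse := by
    rw [List.take_succ, List.getElem?_eq_getElem hml]
    simp [hxval]
  have hchain' : chain ((a.take (m+1)).reverse)
      = x :: R.filter (fun w => decide (x < w)) := by
    rw [htake]; rfl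
  have hBeq := stepB_eq a m (le_of_lt hml) ansB
  simp only [← hxdef, ← hRdef] at hBeq
  have hRne : R ≠ [] := by
    have hlen : (a.take m).length = m := by simp; omega
    cases hc : (a.take m).reverse with
    | nil =>
      exfalso
      have : (a.take m).reverse.length = m := by simp [hlen]
      rw [hc] at this
      simp at this
      omega
    | cons v rp => rw [hRdef, hc, chain]; simp
  obtain ⟨t, rest, hR⟩ := List.exists_cons_of_ne_nil hRne
  rw [hR] at hpair
  rw [List.pairwise_cons] at hpair
  set S := R.filter (fun w => decide (w < x)) with hSdef
  have htne : t ≠ x := hne t (hR ▸ List.mem_cons_self)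
  constructor
  · -- the answer components agree
    by_cases hxt : x < t
    · -- push branch: nothing settled
      have hS : S = [] := by
        rw [hSdef, hR]
        apply filter_lt_nil
        intro w hw
        rcases List.mem_cons.mp hw with hw | hw
        · omega
        · have := hpair.1 w hw; omega
      rw [hBeq]
      simp only [hS, List.length_nil]
      rw [if_neg (by omega)]
      simp only [stepA, hstack, hR, ← hxdef, hxt, if_pos]
      exact hans
    · have htx : t < x := by
        rcases lt_or_eq_of_le (not_lt.mp hxt) with h | h
        · exact h
        · exact absurd h htne
      cases hrest : rest with
      | nil =>
        have hS : S = [t] := by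
          rw [hSdef, hR, hrest, List.filter_cons]
          simp [htx]
        rw [hBeq]
        simp only [hS, List.length_cons, List.length_nil]
        rw [if_neg (by omega)]
        simp only [stepA, hstack, hR, hrest, ← hxdef, hxt, if_neg, if_false]
        exact hans
      | cons t2 r =>
        have ht2 : t < t2 := hpair.1 t2 (hrest ▸ List.mem_cons_self)
        have hrp : (t2 :: r).Pairwise (· < ·) := hrest ▸ hpair.2
        rw [List.pairwise_cons] at hrp
        have ht2ne : t2 ≠ x := hne t2 (by rw [hR, hrest]; simp)
        by_cases hx2 : x > t2
        · -- two or more settled: report t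
          have hS : S = t :: t2 :: r.filter (fun w => decide (w < x)) := by
            rw [hSdef, hR, hrest, List.filter_cons, List.filter_cons]
            rw [if_pos (by simpa using htx), if_pos (by simpa using hx2)]
          rw [hBeq]
          simp only [hS, List.length_cons]
          rw [if_pos (by omega)]
          simp only [stepA, hstack, hR, hrest, ← hxdef, hxt, if_neg, if_false, hx2, if_pos]
          rw [hans]
          congr 1
          simp [PySem.List.pyGetD_zero_cons]
        · -- exactly one settled: no report
          have hS : S = [t] := by
            rw [hSdef, hR, hrest, List.filter_cons, List.filter_cons]
            rw [if_pos (by simpa using htx), if_neg (by simp; omega)]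
            rw [filter_lt_nil x r (fun w hw => by have := hrp.1 w hw; omega)]
          rw [hBeq]
          simp only [hS, List.length_cons, List.length_nil]
          rw [if_neg (by omega)]
          simp only [stepA, hstack, hR, hrest, ← hxdef, hxt, if_neg, if_false, hx2]
          exact hans
  · -- the stack equals the chain of the longer reversed prefix
    rw [hchain']
    by_cases hxt : x < t
    · have hfil : R.filter (fun w => decide (x < w)) = R := by
        apply filter_gt_self
        intro w hw
        rw [hR] at hw
        rcases List.mem_cons.mp hw with hw | hw
        · omega
        · have := hpair.1 w hw; omega
      simp only [stepA, hstack, hR, ← hxdef, hxt, if_pos]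
      rw [← hR, hfil]
    · have htx : t < x := by
        rcases lt_or_eq_of_le (not_lt.mp hxt) with h | h
        · exact h
        · exact absurd h htne
      cases hrest : rest with
      | nil =>
        simp only [stepA, hstack, hR, hrest, ← hxdef, hxt, if_neg, if_false]
        simp [hxt]
      | cons t2 r =>
        have ht2 : t < t2 := hpair.1 t2 (hrest ▸ List.mem_cons_self)
        have hrp : (t2 :: r).Pairwise (· < ·) := hrest ▸ hpair.2
        have ht2ne : t2 ≠ x := hne t2 (by rw [hR, hrest]; simp)
        by_cases hx2 : x > t2
        · simp only [stepA, hstack, hR, hrest, ← hxdef, hxt, if_neg, if_false, hx2, if_pos]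
          rw [List.filter_cons, if_neg (by simpa using hxt)]
          congr 1
          exact popWhileA_eq_filter x (t2 :: r) hrp
            (fun v hv => hne v (by rw [hR, hrest]; exact List.mem_cons_of_mem t hv))
        · rw [List.pairwise_cons] at hrp
          simp only [stepA, hstack, hR, hrest, ← hxdef, hxt, if_neg, if_false, hx2]
          rw [List.filter_cons, if_neg (by simpa using hxt), List.filter_cons,
            if_pos (by simp; omega)]
          rw [filter_gt_self x r (fun w hw => by have := hrp.1 w hw; omega)]

theorem fold_inv (a : List Int) (nn : Nat) (ha : a ≠ []) (hnd : (a.take nn).Nodup)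
    (hnl : nn ≤ a.length) :
    ∀ m : Nat, 1 ≤ m → m ≤ nn →
      SimInv a m
        ((PySem.List.pyRange 1 (m : Int) 1).foldl (stepA a) ([], [PySem.List.pyGetD a 0 0]))
        ((PySem.List.pyRange 1 (m : Int) 1).foldl (stepB a) []) := by
  intro m
  induction m with
  | zero => intro h; omega
  | succ k ih =>
    intro h1 hle
    by_cases hk : 1 ≤ k
    · have hrange : PySem.List.pyRange 1 ((k+1 : Nat) : Int) 1
          = PySem.List.pyRange 1 (k : Int) 1 ++ [(k : Int)] := by
        push_cast
        exact PySem.List.pyRange_one_succ_right (by exact_mod_cast hk)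
      rw [hrange, List.foldl_append, List.foldl_append]
      simp only [List.foldl_cons, List.foldl_nil]
      exact step_inv a nn k hnd hk (by omega) hnl _ _ (ih hk (by omega))
    · have hk0 : k = 0 := by omega
      subst hk0
      have hnil : PySem.List.pyRange 1 ((0+1 : Nat) : Int) 1 = [] := by
        push_cast
        exact PySem.List.pyRange_one_eq_nil (by norm_num)
      rw [hnil]
      simp only [List.foldl_nil]
      obtain ⟨h0, t0, rfl⟩ := List.exists_cons_of_ne_nil ha
      refine ⟨rfl, ?_⟩
      simp [chain, PySem.List.pyGetD_zero_cons]

-- ===== VERDICT (by name: the statement is the Claim_ definition above) =====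
theorem leafNodes_spec : Claim_equal_leafNodes := by
  unfold Claim_equal_leafNodes
  intro a n hdom hpre
  unfold Spec_leafNodes
  obtain ⟨ha, h1, h2, hnd⟩ := hpre
  by_cases hn : 1 ≤ n
  · have hmn : n = ((n.toNat : Nat) : Int) := (Int.toNat_of_nonneg (by omega)).symm
    have hm1 : 1 ≤ n.toNat := by omega
    have hmle : n.toNat ≤ a.length := by omega
    have hinv := fold_inv a n.toNat ha hnd hmle n.toNat hm1 (le_refl _)
    obtain ⟨hans, _⟩ := hinv
    simp only [leafNodes, leafNodes_alt]
    rw [hmn, hans]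
  · have hnil : PySem.List.pyRange 1 n 1 = [] := PySem.List.pyRange_one_eq_nil (by omega)
    simp only [leafNodes, leafNodes_alt]
    rw [hnil]
    simp
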